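-- pv_equiv track=rewrite | github.com/YunSeungHoe/artificial_Intelligence_ssu | Project3/youngwon/8queen.py | notcollision_check
-- ===== SOURCE A (Python) =====
-- def notcollision_check(unit):
--     horizon_collision = sum([unit.count(pos) - 1 for pos in unit]) / 2
--     diagonal_collision = 0
--
--     index = 0
--     for pos in range(0, 7):
--         for j in range(1, 8-pos):
--             if abs(unit[pos] - unit[pos + j]) == j:
--                 diagonal_collision += 1
--     collision = int(horizon_collision + diagonal_collision)
--     return 28-collision
-- ===== SOURCE B (Python) =====
-- def notcollision_check(unit):
--     collisions = 0
--     # diagonal collisions among the 8 queens (columns 0..7), column-major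
--     for j in range(1, 8):
--         for i in range(j):
--             if abs(unit[i] - unit[j]) == j - i:
--                 collisions += 1
--     # horizontal collisions: equal-value pairs over the whole list, one scan per suffix
--     rest = list(unit)
--     while rest:
--         head = rest.pop(0)
--         for v in rest:
--             if head == v:
--                 collisions += 1
--     return 28 - collisions
-- ===== Notes on version B (the rewrite author's own statement) =====
-- stated objective: alternative
-- what changed: Replaces A's count()-based horizontal sum (list.count per element, halved via float division) and its row-major offset diagonal loop with direct pairwise enumeration: a column-major i<j diagonal loop over the 8 columns and a suffix-scan count of equal-value pairs, dropping the per-element full-list count() calls' constant overhead.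
import Mathlib
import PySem

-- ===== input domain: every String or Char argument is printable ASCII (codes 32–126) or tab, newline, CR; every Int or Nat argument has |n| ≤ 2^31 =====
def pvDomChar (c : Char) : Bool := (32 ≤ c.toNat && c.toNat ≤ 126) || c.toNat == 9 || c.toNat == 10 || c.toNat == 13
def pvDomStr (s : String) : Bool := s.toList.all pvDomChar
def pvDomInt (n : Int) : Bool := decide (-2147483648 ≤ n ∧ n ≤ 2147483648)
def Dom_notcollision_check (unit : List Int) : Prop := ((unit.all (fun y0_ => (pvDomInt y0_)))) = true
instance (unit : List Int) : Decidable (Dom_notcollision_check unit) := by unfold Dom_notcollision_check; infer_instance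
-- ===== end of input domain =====

-- B changes the decomposition: direct pairwise enumeration (column-major diagonal loop,
-- suffix-scan equal-pair count) instead of A's count()-sum halved plus row-major offset loop
-- (objective: alternative, same cost).

-- ===== PORT A =====
-- Python's '/ 2' is float division; the sum Σ(count-1) is always even, so floor
-- division is exact here (that evenness is what makes the port faithful).
def notcollision_check (unit : List Int) : Int :=
  let horizon : Int :=
    PySem.Int.floordiv ((unit.map (fun pos => ((PySem.List.count unit pos : Int)) - 1)).sum) 2
  let diag : Int :=
    (PySem.List.pyRange 0 7 1).foldl (fun acc pos =>
      (PySem.List.pyRange 1 (8 - pos) 1).foldl (fun acc2 j =>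
        if |PySem.List.pyGetD unit pos 0 - PySem.List.pyGetD unit (pos + j) 0| = j
        then acc2 + 1 else acc2) acc) 0
  28 - (horizon + diag)

-- ===== PORT B =====
-- the 'while rest: head = rest.pop(0); for v in rest: …' loop of Source B
def pvSuffixScan : List Int → Int → Int
  | [], c => c
  | h :: t, c => pvSuffixScan t (t.foldl (fun acc v => if h = v then acc + 1 else acc) c)

def notcollision_check_alt (unit : List Int) : Int :=
  let diag : Int :=
    (PySem.List.pyRange 1 8 1).foldl (fun acc j =>
      (PySem.List.pyRange 0 j 1).foldl (fun acc2 i =>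
        if |PySem.List.pyGetD unit i 0 - PySem.List.pyGetD unit j 0| = j - i
        then acc2 + 1 else acc2) acc) 0
  28 - pvSuffixScan unit diag

-- ===== PRECONDITION & SPEC =====
-- A indexes unit[0..7] unconditionally in its diagonal loop: it raises IndexError iff len(unit) < 8.
def Pre_notcollision_check (unit : List Int) : Prop := 8 ≤ unit.length
instance (unit : List Int) : Decidable (Pre_notcollision_check unit) := by
  unfold Pre_notcollision_check; infer_instance
def pvWitness_notcollision_check : List Int := [0, 4, 7, 5, 2, 6, 1, 3]

def Spec_notcollision_check (unit : List Int) (out : Int) : Prop := out = notcollision_check_alt unit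
instance (unit : List Int) (out : Int) : Decidable (Spec_notcollision_check unit out) := by unfold Spec_notcollision_check; infer_instance

-- ===== CLAIM (what is proved, stated in full; the proofs are below) =====
def Claim_equal_notcollision_check : Prop := ∀ (unit : List Int), Dom_notcollision_check unit → Pre_notcollision_check unit → Spec_notcollision_check unit (notcollision_check unit)

-- ===== LEMMAS AND PROOFS =====

-- proof-side view of B's horizontal count: equal-value pairs, suffix by suffix
def pvInnerEq (h : Int) : List Int → Int
  | [] => 0
  | v :: vs => (if h = v then 1 else 0) + pvInnerEq h vs

def pvEq : List Int → Int
  | [] => 0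
  | h :: t => pvInnerEq h t + pvEq t

lemma inner_scan (h : Int) (t : List Int) (c : Int) :
    t.foldl (fun acc v => if h = v then acc + 1 else acc) c = c + pvInnerEq h t := by
  induction t generalizing c with
  | nil => simp [pvInnerEq]
  | cons v vs ih =>
    simp only [List.foldl, pvInnerEq]
    rw [ih]
    split_ifs <;> ring

lemma pvSuffixScan_eq (l : List Int) (c : Int) :
    pvSuffixScan l c = c + pvEq l := by
  induction l generalizing c with
  | nil => simp [pvSuffixScan, pvEq]
  | cons h t ih =>
    simp only [pvSuffixScan, pvEq]
    rw [ih, inner_scan]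
    ring

lemma count_eq_pvInnerEq (a : Int) (t : List Int) :
    (PySem.List.count t a : Int) = pvInnerEq a t := by
  induction t with
  | nil => simp [PySem.List.count_eq, pvInnerEq]
  | cons v vs ih =>
    simp only [PySem.List.count_eq, pvInnerEq] at *
    rcases eq_or_ne a v with h | h
    · subst h; simp [List.count_cons_self, ← ih]; ring
    · rw [List.count_cons_of_ne (Ne.symm h)]
      simp [h, ih]

lemma pv_sum_indicator (a : Int) (t : List Int) :
    (t.map (fun pos => if pos = a then (1:Int) else 0)).sum = pvInnerEq a t := by
  induction t with
  | nil => simp [pvInnerEq]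
  | cons v vs ih =>
    simp only [List.map_cons, List.sum_cons, pvInnerEq, ih]
    by_cases hv : v = a
    · simp [hv]
    · simp [hv, Ne.symm hv]

-- A's horizontal sum equals twice B's equal-pair count
lemma horizon_eq (unit : List Int) :
    (unit.map (fun pos => ((PySem.List.count unit pos : Int)) - 1)).sum = 2 * pvEq unit := by
  induction unit with
  | nil => simp [pvEq]
  | cons a t ih =>
    have hcount : ∀ x, (PySem.List.count (a :: t) x : Int)
        = (PySem.List.count t x : Int) + (if x = a then 1 else 0) := by
      intro x
      simp only [PySem.List.count_eq, List.count_cons]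
      rcases eq_or_ne x a with h | h
      · simp [h]
      · simp [h, Ne.symm h]
    have hmap : (t.map (fun pos => ((PySem.List.count (a :: t) pos : Int)) - 1))
        = t.map (fun pos => (((PySem.List.count t pos : Int)) - 1) + (if pos = a then 1 else 0)) := by
      apply List.map_congr_left; intro x _; rw [hcount x]; ring
    have hsum : (t.map (fun pos => (((PySem.List.count t pos : Int)) - 1) + (if pos = a then 1 else 0))).sum
        = (t.map (fun pos => ((PySem.List.count t pos : Int)) - 1)).sum
          + (t.map (fun pos => if pos = a then (1:Int) else 0)).sum := by
      rw [← List.sum_map_add]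
    simp only [List.map_cons, List.sum_cons, pvEq]
    rw [hmap, hsum, pv_sum_indicator, hcount a, ih, count_eq_pvInnerEq]
    simp; ring

-- the diagonal collision count, written out pair by pair (proof-side common form)
def pvDiagSum (a b c d e f g h : Int) : Int :=
    (if |a - b| = 1 then (1:Int) else 0) +
    (if |a - c| = 2 then (1:Int) else 0) +
    (if |a - d| = 3 then (1:Int) else 0) +
    (if |a - e| = 4 then (1:Int) else 0) +
    (if |a - f| = 5 then (1:Int) else 0) +
    (if |a - g| = 6 then (1:Int) else 0) +
    (if |a - h| = 7 then (1:Int) else 0) +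
    (if |b - c| = 1 then (1:Int) else 0) +
    (if |b - d| = 2 then (1:Int) else 0) +
    (if |b - e| = 3 then (1:Int) else 0) +
    (if |b - f| = 4 then (1:Int) else 0) +
    (if |b - g| = 5 then (1:Int) else 0) +
    (if |b - h| = 6 then (1:Int) else 0) +
    (if |c - d| = 1 then (1:Int) else 0) +
    (if |c - e| = 2 then (1:Int) else 0) +
    (if |c - f| = 3 then (1:Int) else 0) +
    (if |c - g| = 4 then (1:Int) else 0) +
    (if |c - h| = 5 then (1:Int) else 0) +
    (if |d - e| = 1 then (1:Int) else 0) +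
    (if |d - f| = 2 then (1:Int) else 0) +
    (if |d - g| = 3 then (1:Int) else 0) +
    (if |d - h| = 4 then (1:Int) else 0) +
    (if |e - f| = 1 then (1:Int) else 0) +
    (if |e - g| = 2 then (1:Int) else 0) +
    (if |e - h| = 3 then (1:Int) else 0) +
    (if |f - g| = 1 then (1:Int) else 0) +
    (if |f - h| = 2 then (1:Int) else 0) +
    (if |g - h| = 1 then (1:Int) else 0)

-- A's row-major offset diagonal loop, evaluated on a list of length ≥ 8
set_option maxHeartbeats 2000000 in
lemma diagA_eq (a b c d e f g h : Int) (rest : List Int) :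
    (PySem.List.pyRange 0 7 1).foldl (fun acc pos =>
      (PySem.List.pyRange 1 (8 - pos) 1).foldl (fun acc2 j =>
        if |PySem.List.pyGetD (a :: b :: c :: d :: e :: f :: g :: h :: rest) pos 0
            - PySem.List.pyGetD (a :: b :: c :: d :: e :: f :: g :: h :: rest) (pos + j) 0| = j
        then acc2 + 1 else acc2) acc) 0 = pvDiagSum a b c d e f g h := by
  have hsplit : ∀ (c : Prop) (inst : Decidable c) (x : Int),
      (if c then x + 1 else x) = x + (if c then 1 else 0) := by
    intro c inst x; split_ifs <;> ring
  have g0 : PySem.List.pyGetD (a :: b :: c :: d :: e :: f :: g :: h :: rest) (0:Int) 0 = a := by simp [pysem]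
  have g1 : PySem.List.pyGetD (a :: b :: c :: d :: e :: f :: g :: h :: rest) (1:Int) 0 = b := by simp [pysem]
  have g2 : PySem.List.pyGetD (a :: b :: c :: d :: e :: f :: g :: h :: rest) (2:Int) 0 = c := by simp [pysem]
  have g3 : PySem.List.pyGetD (a :: b :: c :: d :: e :: f :: g :: h :: rest) (3:Int) 0 = d := by simp [pysem]
  have g4 : PySem.List.pyGetD (a :: b :: c :: d :: e :: f :: g :: h :: rest) (4:Int) 0 = e := by simp [pysem]
  have g5 : PySem.List.pyGetD (a :: b :: c :: d :: e :: f :: g :: h :: rest) (5:Int) 0 = f := by simp [pysem]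
  have g6 : PySem.List.pyGetD (a :: b :: c :: d :: e :: f :: g :: h :: rest) (6:Int) 0 = g := by simp [pysem]
  have g7 : PySem.List.pyGetD (a :: b :: c :: d :: e :: f :: g :: h :: rest) (7:Int) 0 = h := by simp [pysem]
  norm_num only [pvDiagSum,
    show PySem.List.pyRange 0 7 1 = ([0,1,2,3,4,5,6] : List Int) from by decide,
    show PySem.List.pyRange 1 8 1 = ([1,2,3,4,5,6,7] : List Int) from by decide,
    show PySem.List.pyRange 1 7 1 = ([1,2,3,4,5,6] : List Int) from by decide,
    show PySem.List.pyRange 1 6 1 = ([1,2,3,4,5] : List Int) from by decide,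
    show PySem.List.pyRange 1 5 1 = ([1,2,3,4] : List Int) from by decide,
    show PySem.List.pyRange 1 4 1 = ([1,2,3] : List Int) from by decide,
    show PySem.List.pyRange 1 3 1 = ([1,2] : List Int) from by decide,
    show PySem.List.pyRange 1 2 1 = ([1] : List Int) from by decide,
    show PySem.List.pyRange 0 1 1 = ([0] : List Int) from by decide,
    show PySem.List.pyRange 0 2 1 = ([0,1] : List Int) from by decide,
    show PySem.List.pyRange 0 3 1 = ([0,1,2] : List Int) from by decide,
    show PySem.List.pyRange 0 4 1 = ([0,1,2,3] : List Int) from by decide,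
    show PySem.List.pyRange 0 5 1 = ([0,1,2,3,4] : List Int) from by decide,
    show PySem.List.pyRange 0 6 1 = ([0,1,2,3,4,5] : List Int) from by decide,
    List.foldl, hsplit, g0, g1, g2, g3, g4, g5, g6, g7]
  ring

-- B's column-major i<j diagonal loop, evaluated on the same list
set_option maxHeartbeats 2000000 in
lemma diagB_eq (a b c d e f g h : Int) (rest : List Int) :
    (PySem.List.pyRange 1 8 1).foldl (fun acc j =>
      (PySem.List.pyRange 0 j 1).foldl (fun acc2 i =>
        if |PySem.List.pyGetD (a :: b :: c :: d :: e :: f :: g :: h :: rest) i 0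
            - PySem.List.pyGetD (a :: b :: c :: d :: e :: f :: g :: h :: rest) j 0| = j - i
        then acc2 + 1 else acc2) acc) 0 = pvDiagSum a b c d e f g h := by
  have hsplit : ∀ (c : Prop) (inst : Decidable c) (x : Int),
      (if c then x + 1 else x) = x + (if c then 1 else 0) := by
    intro c inst x; split_ifs <;> ring
  have g0 : PySem.List.pyGetD (a :: b :: c :: d :: e :: f :: g :: h :: rest) (0:Int) 0 = a := by simp [pysem]
  have g1 : PySem.List.pyGetD (a :: b :: c :: d :: e :: f :: g :: h :: rest) (1:Int) 0 = b := by simp [pysem]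
  have g2 : PySem.List.pyGetD (a :: b :: c :: d :: e :: f :: g :: h :: rest) (2:Int) 0 = c := by simp [pysem]
  have g3 : PySem.List.pyGetD (a :: b :: c :: d :: e :: f :: g :: h :: rest) (3:Int) 0 = d := by simp [pysem]
  have g4 : PySem.List.pyGetD (a :: b :: c :: d :: e :: f :: g :: h :: rest) (4:Int) 0 = e := by simp [pysem]
  have g5 : PySem.List.pyGetD (a :: b :: c :: d :: e :: f :: g :: h :: rest) (5:Int) 0 = f := by simp [pysem]
  have g6 : PySem.List.pyGetD (a :: b :: c :: d :: e :: f :: g :: h :: rest) (6:Int) 0 = g := by simp [pysem]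
  have g7 : PySem.List.pyGetD (a :: b :: c :: d :: e :: f :: g :: h :: rest) (7:Int) 0 = h := by simp [pysem]
  norm_num only [pvDiagSum,
    show PySem.List.pyRange 0 7 1 = ([0,1,2,3,4,5,6] : List Int) from by decide,
    show PySem.List.pyRange 1 8 1 = ([1,2,3,4,5,6,7] : List Int) from by decide,
    show PySem.List.pyRange 1 7 1 = ([1,2,3,4,5,6] : List Int) from by decide,
    show PySem.List.pyRange 1 6 1 = ([1,2,3,4,5] : List Int) from by decide,
    show PySem.List.pyRange 1 5 1 = ([1,2,3,4] : List Int) from by decide,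
    show PySem.List.pyRange 1 4 1 = ([1,2,3] : List Int) from by decide,
    show PySem.List.pyRange 1 3 1 = ([1,2] : List Int) from by decide,
    show PySem.List.pyRange 1 2 1 = ([1] : List Int) from by decide,
    show PySem.List.pyRange 0 1 1 = ([0] : List Int) from by decide,
    show PySem.List.pyRange 0 2 1 = ([0,1] : List Int) from by decide,
    show PySem.List.pyRange 0 3 1 = ([0,1,2] : List Int) from by decide,
    show PySem.List.pyRange 0 4 1 = ([0,1,2,3] : List Int) from by decide,
    show PySem.List.pyRange 0 5 1 = ([0,1,2,3,4] : List Int) from by decide,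
    show PySem.List.pyRange 0 6 1 = ([0,1,2,3,4,5] : List Int) from by decide,
    List.foldl, hsplit, g0, g1, g2, g3, g4, g5, g6, g7]
  ring

-- ===== VERDICT (by name: the statement is the Claim_ definition above) =====
theorem notcollision_check_spec : Claim_equal_notcollision_check := by
  intro unit _ hpre
  unfold Spec_notcollision_check notcollision_check notcollision_check_alt
  obtain ⟨a, b, c, d, e, f, g, h, rest, rfl⟩ :
      ∃ a b c d e f g h rest, unit = a :: b :: c :: d :: e :: f :: g :: h :: rest := by
    match unit, hpre with
    | a :: b :: c :: d :: e :: f :: g :: h :: rest, _ =>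
      exact ⟨a, b, c, d, e, f, g, h, rest, rfl⟩
  rw [horizon_eq, diagA_eq, diagB_eq,
    PySem.Int.floordiv_eq_ediv_of_pos (by omega), Int.mul_ediv_cancel_left _ (by omega)]
  simp only [pvSuffixScan_eq]
  ring
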